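-- pv_equiv track=rewrite | github.com/refnil/schedule-finder | check.py | determineCollision
-- ===== SOURCE A (Python) =====
-- def determineCollision(classTime):
--     d = dict()
--     for m in classTime:
--         d[m] = [];
--         rem = classTime.copy();
--         s = set(classTime[m])
--         del rem[m]
--         for m2 in rem:
--             if not s.isdisjoint( rem[m2] ):
--                 d[m] += [m2]
--     return d
-- ===== SOURCE B (Python) =====
-- def determineCollision(classTime):
--     items = list(classTime.items())
--     # inverted index: time slot -> indices of the classes that contain it
--     index = {}
--     for i, (k, ts) in enumerate(items):
--         for t in ts:
--             index.setdefault(t, []).append(i)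
--     # union the postings of every slot into the collision set of each class
--     collide = [set() for _ in items]
--     for postings in index.values():
--         for i in postings:
--             collide[i].update(postings)
--     return {k: [items[j][0] for j in sorted(collide[i]) if j != i]
--             for i, (k, ts) in enumerate(items)}
-- ===== Notes on version B (the rewrite author's own statement) =====
-- stated objective: faster
-- what changed: Replaced A's per-class dict copy and all-pairs disjointness scan with an inverted index (time slot -> posting list of class indices) whose postings are unioned into each class's collision set, emitted in key order.
import Mathlib
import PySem

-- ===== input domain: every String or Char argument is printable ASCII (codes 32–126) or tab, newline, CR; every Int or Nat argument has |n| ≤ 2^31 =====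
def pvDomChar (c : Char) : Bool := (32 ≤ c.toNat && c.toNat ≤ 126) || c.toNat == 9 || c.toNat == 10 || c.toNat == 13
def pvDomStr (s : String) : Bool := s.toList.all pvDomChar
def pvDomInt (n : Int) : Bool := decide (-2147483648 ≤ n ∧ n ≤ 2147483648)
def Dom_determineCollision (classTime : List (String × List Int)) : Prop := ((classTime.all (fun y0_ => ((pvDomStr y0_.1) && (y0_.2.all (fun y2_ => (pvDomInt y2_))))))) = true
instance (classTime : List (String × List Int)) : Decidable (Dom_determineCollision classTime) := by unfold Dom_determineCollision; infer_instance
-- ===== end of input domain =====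

-- B replaces A's quadratic all-pairs scan by an inverted index from time slot to the classes
-- containing it, unioning postings per class; same return value on every dict input.
-- ===== PORT A =====
def determineCollision (classTime : List (String × List Int)) : List (String × List String) :=
  let ct : PySem.Dict String (List Int) := PySem.Dict.mk classTime
  (ct.keys.foldl (fun d m =>
    let d := d.insert m ([] : List String)
    let rem := ct.erase m                                  -- rem = classTime.copy(); del rem[m]
    let s : PySem.Set Int := PySem.Set.ofList (ct.getD m [])
    rem.keys.foldl (fun d m2 =>
      if ¬ (PySem.Set.isdisjoint s (rem.getD m2 []) = true) then
        d.modify m [] (fun L => L ++ [m2])                 -- d[m] += [m2]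
      else d) d) PySem.Dict.empty).items

-- ===== PORT B =====
def determineCollision_alt (classTime : List (String × List Int)) : List (String × List String) :=
  let items := classTime
  let index : PySem.Dict Int (List Int) :=
    (PySem.List.enumerate items).foldl (fun ix p =>
      p.2.2.foldl (fun ix t => ix.modify t [] (fun ps => ps ++ [p.1])) ix)   -- index.setdefault(t, []).append(i)
      PySem.Dict.empty
  let collide : List (PySem.Set Int) :=
    index.values.foldl (fun c ps =>
      ps.foldl (fun c i =>
        PySem.List.pySetD c i (PySem.Set.update (PySem.List.pyGetD c i PySem.Set.empty) ps)) c)  -- collide[i].update(postings)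
      (List.replicate items.length PySem.Set.empty)
  ((PySem.List.enumerate items).foldl (fun d p =>
      d.insert p.2.1
        (((PySem.List.sorted (PySem.List.pyGetD collide p.1 PySem.Set.empty) id).filter
            (fun j => j ≠ p.1)).map
          (fun j => (PySem.List.pyGetD items j ("", [])).1)))
    PySem.Dict.empty).items

-- ===== PRECONDITION & SPEC =====
-- Pre_ excludes association lists with duplicate keys: they do not represent a Python dict
-- (A's parameter is a dict, whose keys are necessarily distinct), so A never receives them.
def Pre_determineCollision (classTime : List (String × List Int)) : Prop :=
  (classTime.map Prod.fst).Nodup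
instance (classTime : List (String × List Int)) : Decidable (Pre_determineCollision classTime) := by
  unfold Pre_determineCollision; infer_instance
def pvWitness_determineCollision : (List (String × List Int)) :=
  [("a", [1, 2]), ("b", [2, 3]), ("c", [4])]
def Spec_determineCollision (classTime : List (String × List Int)) (out : List (String × List String)) : Prop := out = determineCollision_alt classTime
instance (classTime : List (String × List Int)) (out : List (String × List String)) : Decidable (Spec_determineCollision classTime out) := by unfold Spec_determineCollision; infer_instance

-- ===== CLAIM (what is proved, stated in full; the proofs are below) =====
def Claim_equal_determineCollision : Prop := ∀ (classTime : List (String × List Int)), Dom_determineCollision classTime → Pre_determineCollision classTime → Spec_determineCollision classTime (determineCollision classTime)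

-- ===== LEMMAS AND PROOFS =====

-- helpers
def pvDflt : String × List Int := ("", [])
def pvVal (ct : List (String × List Int)) (i : Nat) : List Int := (ct.getD i pvDflt).2
def pvKey (ct : List (String × List Int)) (i : Nat) : String := (ct.getD i pvDflt).1
def pvShare (ct : List (String × List Int)) (i j : Nat) : Bool :=
  decide (∃ t ∈ pvVal ct i, t ∈ pvVal ct j)
def pvCanon (ct : List (String × List Int)) : List (String × List String) :=
  (List.range ct.length).map (fun i =>
    (pvKey ct i,
     ((List.range ct.length).filter (fun j => decide (j ≠ i) && pvShare ct i j)).map (pvKey ct)))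

lemma pv_filter_pos {α : Type} (l : List α) (p : α → Bool) (d : α) :
    l.filter p = ((List.range l.length).filter (fun j => p (l.getD j d))).map (fun j => l.getD j d) := by
  induction l with
  | nil => simp
  | cons a l ih =>
    rw [List.length_cons, List.range_succ_eq_map]
    by_cases h : p a
    · rw [List.filter_cons_of_pos h, List.filter_cons_of_pos (by simpa using h)]
      simp only [List.map_cons, List.getD_cons_zero, List.filter_map, List.map_map]
      rw [ih]
      simp [Function.comp_def]
    · rw [List.filter_cons_of_neg h, List.filter_cons_of_neg (by simpa using h)]
      simp only [List.filter_map, List.map_map]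
      rw [ih]
      simp [Function.comp_def]

lemma pvA_inner (g : String → Bool) (l : List String) (m : String)
    (d : PySem.Dict String (List String)) (L : List String) :
    l.foldl (fun d m2 => if ¬ (g m2 = true) then d.modify m [] (fun L => L ++ [m2]) else d) (d.insert m L)
      = d.insert m (L ++ l.filter (fun m2 => !(g m2))) := by
  induction l generalizing L with
  | nil => simp
  | cons m2 l ih =>
    rw [List.foldl_cons]
    by_cases h : g m2 = true
    · rw [if_neg (by simp [h]), List.filter_cons_of_neg (by simp [h])]
      exact ih L
    · rw [if_pos h]
      have hstep : (d.insert m L).modify m [] (fun L => L ++ [m2]) = d.insert m (L ++ [m2]) := by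
        simp [PySem.Dict.modify, PySem.Dict.getD_insert_self, PySem.Dict.insert_insert_self]
      rw [hstep, ih (L ++ [m2]), List.filter_cons_of_pos (by simp [h])]
      simp

def pvCondA (ct : List (String × List Int)) (m m2 : String) : Bool :=
  PySem.Set.isdisjoint (PySem.Set.ofList ((PySem.Dict.mk ct).getD m []))
    (((PySem.Dict.mk ct).erase m).getD m2 [])
def pvEntryA (ct : List (String × List Int)) (m : String) : List String :=
  (((PySem.Dict.mk ct).erase m).keys).filter (fun m2 => !(pvCondA ct m m2))

lemma pvA_items (ct : List (String × List Int)) (hnd : (ct.map Prod.fst).Nodup) :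
    determineCollision ct = ct.map (fun p => (p.1, pvEntryA ct p.1)) := by
  unfold determineCollision
  simp only []
  have hbody : (fun (d : PySem.Dict String (List String)) m =>
      ((PySem.Dict.mk ct).erase m).keys.foldl (fun d m2 =>
        if ¬ (PySem.Set.isdisjoint (PySem.Set.ofList ((PySem.Dict.mk ct).getD m []))
              (((PySem.Dict.mk ct).erase m).getD m2 []) = true) then
          d.modify m [] (fun L => L ++ [m2]) else d) (d.insert m []))
      = fun d m => d.insert m (pvEntryA ct m) := by
    funext d m
    rw [pvA_inner]
    simp [pvEntryA, pvCondA]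
  rw [hbody]
  have h2 := PySem.Dict.items_foldl_insert_fresh (κ := String) (ν := List String)
      ((PySem.Dict.mk ct).keys) (fun a => a) (pvEntryA ct) PySem.Dict.empty
      (by intro a _; exact PySem.Dict.contains_empty a) (by simpa using hnd)
  simp only [] at h2
  rw [h2]
  show List.map _ (List.map _ ct) = _
  simp [List.map_map, Function.comp_def]

lemma pv_getD_mem {ν : Type} (d : PySem.Dict String ν) (hnd : d.keys.Nodup)
    {q : String × ν} (hq : q ∈ d.items) (d0 : ν) : d.getD q.1 d0 = q.2 := by
  have h := PySem.Dict.get?_of_mem_items d (k := q.1) (v := q.2) (by simpa using hq) hnd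
  simp [PySem.Dict.getD, h]

lemma pv_keys_mk (ct : List (String × List Int)) (hnd : (ct.map Prod.fst).Nodup) :
    (PySem.Dict.mk ct).keys.Nodup := by
  simpa [PySem.Dict.keys] using hnd

lemma pv_getD_at (ct : List (String × List Int)) (hnd : (ct.map Prod.fst).Nodup)
    (i : Nat) (hi : i < ct.length) :
    (PySem.Dict.mk ct).getD (pvKey ct i) ([] : List Int) = pvVal ct i := by
  have hmem : (pvKey ct i, pvVal ct i) ∈ ct := by
    have h : ct[i] = (pvKey ct i, pvVal ct i) := by
      simp [pvKey, pvVal, hi]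
    rw [← h]
    exact List.getElem_mem _
  exact pv_getD_mem _ (pv_keys_mk ct hnd) (q := (pvKey ct i, pvVal ct i)) hmem []

lemma pv_not_disj (v w : List Int) :
    (!(PySem.Set.isdisjoint (PySem.Set.ofList v) w)) = decide (∃ t ∈ v, t ∈ w) := by
  cases hb : PySem.Set.isdisjoint (PySem.Set.ofList v) w with
  | true =>
    have h := (PySem.Set.isdisjoint_iff _ _).mp hb
    simp only [Bool.not_true]
    symm
    simp only [decide_eq_false_iff_not]
    rintro ⟨t, ht, htw⟩
    exact h t (by simpa [PySem.Set.mem_ofList] using ht) htw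
  | false =>
    simp only [Bool.not_false]
    symm
    simp only [decide_eq_true_eq]
    by_contra hne
    rw [not_exists] at hne
    have : PySem.Set.isdisjoint (PySem.Set.ofList v) w = true := by
      rw [PySem.Set.isdisjoint_iff]
      intro x hx hw
      exact hne x ⟨by simpa [PySem.Set.mem_ofList] using hx, hw⟩
    rw [this] at hb
    cases hb

lemma pvKey_inj (ct : List (String × List Int)) (hnd : (ct.map Prod.fst).Nodup)
    {i j : Nat} (hi : i < ct.length) (hj : j < ct.length) :
    (pvKey ct i = pvKey ct j) ↔ i = j := by
  have h1 : pvKey ct i = (ct.map Prod.fst)[i]'(by simpa using hi) := by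
    simp [pvKey, hi]
  have h2 : pvKey ct j = (ct.map Prod.fst)[j]'(by simpa using hj) := by
    simp [pvKey, hj]
  rw [h1, h2, hnd.getElem_inj_iff]

lemma pvA_entry (ct : List (String × List Int)) (hnd : (ct.map Prod.fst).Nodup)
    (i : Nat) (hi : i < ct.length) :
    pvEntryA ct (pvKey ct i)
      = ((List.range ct.length).filter (fun j => decide (j ≠ i) && pvShare ct i j)).map (pvKey ct) := by
  unfold pvEntryA
  have herase : ((PySem.Dict.mk ct).erase (pvKey ct i)).items
      = ct.filter (fun p => !(p.1 == pvKey ct i)) := rfl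
  have hkeys : ((PySem.Dict.mk ct).erase (pvKey ct i)).keys
      = (ct.filter (fun p => !(p.1 == pvKey ct i))).map (fun p => p.1) := by
    simp [PySem.Dict.keys, herase]
  rw [hkeys, List.filter_map]
  -- rewrite the condition on members of the filtered list
  have hremnd : ((PySem.Dict.mk ct).erase (pvKey ct i)).keys.Nodup := by
    rw [hkeys]
    exact List.Nodup.sublist (List.Sublist.map _ List.filter_sublist) (by simpa using hnd)
  have hcong : (ct.filter (fun p => !(p.1 == pvKey ct i))).filter
        ((fun m2 => !(pvCondA ct (pvKey ct i) m2)) ∘ (fun p => p.1))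
      = (ct.filter (fun p => !(p.1 == pvKey ct i))).filter
        (fun q => !(PySem.Set.isdisjoint (PySem.Set.ofList (pvVal ct i)) q.2)) := by
    apply List.filter_congr
    intro q hq
    simp only [Function.comp_apply, pvCondA]
    rw [pv_getD_at ct hnd i hi]
    have : (((PySem.Dict.mk ct).erase (pvKey ct i)).getD q.1 ([] : List Int)) = q.2 :=
      pv_getD_mem _ hremnd (by rw [herase]; exact hq) []
    rw [this]
  rw [hcong, List.filter_filter]
  rw [pv_filter_pos ct _ pvDflt, List.map_map]
  congr 1
  apply List.filter_congr
  intro j hj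
  have hjn : j < ct.length := by simpa using List.mem_range.mp hj
  have hval : (ct.getD j pvDflt).2 = pvVal ct j := rfl
  have hkey : (ct.getD j pvDflt).1 = pvKey ct j := rfl
  rw [hval, hkey, pv_not_disj]
  have hbeq : (pvKey ct j == pvKey ct i) = decide (j = i) := by
    by_cases h : j = i
    · simp [h]
    · have hne : ¬ pvKey ct j = pvKey ct i := fun hk => h ((pvKey_inj ct hnd hjn hi).mp hk)
      simp [h, hne]
  rw [hbeq, Bool.and_comm]
  simp [pvShare]

lemma pvA_canon (ct : List (String × List Int)) (hnd : (ct.map Prod.fst).Nodup) :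
    determineCollision ct = pvCanon ct := by
  rw [pvA_items ct hnd]
  unfold pvCanon
  apply List.ext_getElem (by simp)
  intro i h1 h2
  have hi : i < ct.length := by simpa using h1
  simp only [List.getElem_map, List.getElem_range]
  have hk : ct[i].1 = pvKey ct i := by simp [pvKey, hi]
  rw [hk, pvA_entry ct hnd i hi]

-- ===== B side =====
def pvP (ct : List (String × List Int)) : List (Int × Int) :=
  (PySem.List.enumerate ct).flatMap (fun p => p.2.2.map (fun t => (t, p.1)))
def pvIndex (ct : List (String × List Int)) : PySem.Dict Int (List Int) :=
  (pvP ct).foldl (fun d q => d.modify q.1 [] (fun ps => ps ++ [q.2])) PySem.Dict.empty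

lemma pv_enumerate_getElem {α : Type} (xs : List α) (s : Int) (i : Nat) (hi : i < xs.length) :
    (PySem.List.enumerate xs s)[i]'(by simpa [PySem.List.length_enumerate] using hi)
      = (s + i, xs[i]) := by
  induction xs generalizing s i with
  | nil => simp at hi
  | cons x xs ih =>
    cases i with
    | zero => simp [PySem.List.enumerate_cons]
    | succ i =>
      have hi' : i < xs.length := by simpa using hi
      have := ih (s + 1) i hi'
      simp only [PySem.List.enumerate_cons, List.getElem_cons_succ, this]
      congr 1
      push_cast
      ring

lemma pv_mem_enumerate {α : Type} (xs : List α) (s : Int) (p : Int × α) :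
    p ∈ PySem.List.enumerate xs s ↔ ∃ j : Nat, ∃ h : j < xs.length, p = (s + j, xs[j]) := by
  rw [List.mem_iff_getElem]
  constructor
  · rintro ⟨j, hj, hp⟩
    have hj' : j < xs.length := by simpa [PySem.List.length_enumerate] using hj
    exact ⟨j, hj', by rw [← hp, pv_enumerate_getElem xs s j hj']⟩
  · rintro ⟨j, hj, hp⟩
    exact ⟨j, by simpa [PySem.List.length_enumerate] using hj,
      by rw [pv_enumerate_getElem xs s j hj, hp]⟩

lemma pv_mem_P (ct : List (String × List Int)) (t i : Int) :
    ((t, i) ∈ pvP ct) ↔ ∃ j : Nat, j < ct.length ∧ i = (j : Int) ∧ t ∈ pvVal ct j := by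
  unfold pvP
  rw [List.mem_flatMap]
  constructor
  · rintro ⟨p, hp, hmem⟩
    rcases (pv_mem_enumerate ct 0 p).mp hp with ⟨j, hj, rfl⟩
    rcases List.mem_map.mp hmem with ⟨t', ht', heq⟩
    cases heq
    refine ⟨j, hj, by simp, ?_⟩
    simpa [pvVal, List.getD_eq_getElem, hj] using ht'
  · rintro ⟨j, hj, rfl, ht⟩
    refine ⟨((0 : Int) + j, ct[j]), (pv_mem_enumerate ct 0 _).mpr ⟨j, hj, rfl⟩, ?_⟩
    rw [List.mem_map]
    refine ⟨t, by simpa [pvVal, List.getD_eq_getElem, hj] using ht, by simp⟩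

lemma pv_postings (ct : List (String × List Int)) (t : Int) :
    (pvIndex ct).getD t [] = ((pvP ct).filter (fun q => q.1 == t)).map (fun q => q.2) := by
  unfold pvIndex
  rw [PySem.Dict.getD_foldl_modify_append]
  simp

lemma pv_mem_postings (ct : List (String × List Int)) (t i : Int) :
    i ∈ (pvIndex ct).getD t [] ↔ ∃ j : Nat, j < ct.length ∧ i = (j : Int) ∧ t ∈ pvVal ct j := by
  rw [pv_postings, ← pv_mem_P]
  constructor
  · intro h
    rcases List.mem_map.mp h with ⟨q, hq, rfl⟩
    rcases List.mem_filter.mp hq with ⟨hqP, hqt⟩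
    have : q.1 = t := by simpa using hqt
    rw [← this]
    simpa using hqP
  · intro h
    exact List.mem_map.mpr ⟨(t, i), List.mem_filter.mpr ⟨h, by simp⟩, rfl⟩

lemma pv_index_keys (ct : List (String × List Int)) :
    (pvIndex ct).keys = PySem.Set.ofList ((pvP ct).map (fun q => q.1)) := by
  unfold pvIndex
  rw [PySem.Dict.keys_foldl_modify_key (pvP ct) Prod.fst [] (fun _ q => (fun ps => ps ++ [q.2]))]
  simp [PySem.Dict.keys_empty, PySem.Set.update_nil_left]

lemma pv_index_keys_nodup (ct : List (String × List Int)) : (pvIndex ct).keys.Nodup := by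
  unfold pvIndex
  exact PySem.Dict.nodup_keys_foldl_modify_key (pvP ct) Prod.fst []
    (fun _ q => (fun ps => ps ++ [q.2])) PySem.Dict.empty (by simp [PySem.Dict.keys_empty])

lemma pv_index_values (ct : List (String × List Int)) :
    (pvIndex ct).values = (pvIndex ct).keys.map (fun t => (pvIndex ct).getD t []) := by
  have h := PySem.Dict.items_eq_map_keys (pvIndex ct) (pv_index_keys_nodup ct) []
  show ((pvIndex ct).items).map (fun x => x.2) = _
  rw [h, List.map_map]
  rfl

def pvUpd (ps : List Int) (c : List (PySem.Set Int)) (i : Int) : List (PySem.Set Int) :=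
  PySem.List.pySetD c i (PySem.Set.update (PySem.List.pyGetD c i PySem.Set.empty) ps)

lemma pv_collide_inner (ps sub : List Int) (c : List (PySem.Set Int))
    (hsub : ∀ i ∈ sub, 0 ≤ i ∧ i < (c.length : Int)) :
    (sub.foldl (pvUpd ps) c).length = c.length ∧
    ∀ k : Nat, k < c.length →
      (∀ j : Int, j ∈ (sub.foldl (pvUpd ps) c).getD k ∅ ↔
        j ∈ c.getD k ∅ ∨ ((k : Int) ∈ sub ∧ j ∈ ps)) ∧
      ((c.getD k ∅).Nodup → ((sub.foldl (pvUpd ps) c).getD k ∅).Nodup) := by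
  induction sub generalizing c with
  | nil => simp
  | cons i sub ih =>
    obtain ⟨hi0, hilt⟩ := hsub i (by simp)
    have hitn : i.toNat < c.length := by omega
    have hc1 : pvUpd ps c i = c.set i.toNat (PySem.Set.update (c.getD i.toNat ∅) ps) := by
      unfold pvUpd
      rw [PySem.List.pySetD_of_nonneg _ _ hi0,
          PySem.List.pyGetD_eq_getElem _ _ hi0 (by exact_mod_cast hilt),
          List.getD_eq_getElem c ∅ hitn]
    have hlen1 : (pvUpd ps c i).length = c.length := by
      rw [hc1]; simp
    have hsub' : ∀ x ∈ sub, 0 ≤ x ∧ x < ((pvUpd ps c i).length : Int) := by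
      intro x hx
      rw [hlen1]
      exact hsub x (by simp [hx])
    obtain ⟨hlen, hmem⟩ := ih (pvUpd ps c i) hsub'
    rw [List.foldl_cons] at *
    refine ⟨by rw [hlen, hlen1], ?_⟩
    intro k hk
    have hk1 : k < (pvUpd ps c i).length := by rw [hlen1]; exact hk
    have hgetD1 : (pvUpd ps c i).getD k ∅ =
        if i.toNat = k then PySem.Set.update (c.getD k ∅) ps else c.getD k ∅ := by
      rw [hc1, List.getD_eq_getElem _ ∅ (by simpa using hk), List.getElem_set]
      split_ifs with h
      · rw [h]
      · rw [List.getD_eq_getElem c ∅ hk]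
    obtain ⟨hm, hnd⟩ := hmem k hk1
    constructor
    · intro j
      rw [hm j, hgetD1]
      split_ifs with h
      · rw [PySem.Set.mem_update]
        have hik : (k : Int) = i := by omega
        constructor
        · rintro ((hj | hj) | ⟨hks, hj⟩)
          · exact Or.inl hj
          · exact Or.inr ⟨by simp [hik], hj⟩
          · exact Or.inr ⟨by simp [hks], hj⟩
        · rintro (hj | ⟨_, hj⟩)
          · exact Or.inl (Or.inl hj)
          · exact Or.inl (Or.inr hj)
      · have hik : ¬ ((k : Int) = i) := by omega
        constructor
        · rintro (hj | ⟨hks, hj⟩)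
          · exact Or.inl hj
          · exact Or.inr ⟨List.mem_cons_of_mem _ hks, hj⟩
        · rintro (hj | ⟨hks, hj⟩)
          · exact Or.inl hj
          · rcases List.mem_cons.mp hks with h' | h'
            · exact absurd h' hik
            · exact Or.inr ⟨h', hj⟩
    · intro hcnd
      apply hnd
      rw [hgetD1]
      split_ifs with h
      · exact PySem.Set.nodup_update _ _ hcnd
      · exact hcnd

lemma pv_collide_fold (psl : List (List Int)) (c : List (PySem.Set Int))
    (hps : ∀ ps ∈ psl, ∀ i ∈ ps, 0 ≤ i ∧ i < (c.length : Int)) :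
    (psl.foldl (fun c ps => ps.foldl (pvUpd ps) c) c).length = c.length ∧
    ∀ k : Nat, k < c.length →
      (∀ j : Int, j ∈ (psl.foldl (fun c ps => ps.foldl (pvUpd ps) c) c).getD k ∅ ↔
        j ∈ c.getD k ∅ ∨ ∃ ps ∈ psl, (k : Int) ∈ ps ∧ j ∈ ps) ∧
      ((c.getD k ∅).Nodup → ((psl.foldl (fun c ps => ps.foldl (pvUpd ps) c) c).getD k ∅).Nodup) := by
  induction psl generalizing c with
  | nil => simp
  | cons ps psl ih =>
    have hps0 : ∀ i ∈ ps, 0 ≤ i ∧ i < (c.length : Int) := hps ps (by simp)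
    obtain ⟨hlen1, hmem1⟩ := pv_collide_inner ps ps c hps0
    have hps' : ∀ q ∈ psl, ∀ i ∈ q, 0 ≤ i ∧ i < ((ps.foldl (pvUpd ps) c).length : Int) := by
      intro q hq i hi
      rw [hlen1]
      exact hps q (by simp [hq]) i hi
    obtain ⟨hlen, hmem⟩ := ih (ps.foldl (pvUpd ps) c) hps'
    rw [List.foldl_cons] at *
    refine ⟨by rw [hlen, hlen1], ?_⟩
    intro k hk
    have hk1 : k < (ps.foldl (pvUpd ps) c).length := by rw [hlen1]; exact hk
    obtain ⟨hm1, hnd1⟩ := hmem1 k hk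
    obtain ⟨hm, hnd⟩ := hmem k hk1
    constructor
    · intro j
      rw [hm j, hm1 j]
      constructor
      · rintro ((hj | hj) | ⟨q, hq, hjq⟩)
        · exact Or.inl hj
        · exact Or.inr ⟨ps, by simp, hj⟩
        · exact Or.inr ⟨q, by simp [hq], hjq⟩
      · rintro (hj | ⟨q, hq, hjq⟩)
        · exact Or.inl (Or.inl hj)
        · rcases List.mem_cons.mp hq with rfl | hq'
          · exact Or.inl (Or.inr hjq)
          · exact Or.inr ⟨q, hq', hjq⟩
    · intro hcnd
      exact hnd (hnd1 hcnd)

def pvCollide (ct : List (String × List Int)) : List (PySem.Set Int) :=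
  (pvIndex ct).values.foldl (fun c ps => ps.foldl (pvUpd ps) c)
    (List.replicate ct.length PySem.Set.empty)

lemma pv_values_range (ct : List (String × List Int)) :
    ∀ ps ∈ (pvIndex ct).values, ∀ i ∈ ps, 0 ≤ i ∧ i < (ct.length : Int) := by
  intro ps hps i hi
  rw [pv_index_values] at hps
  rcases List.mem_map.mp hps with ⟨t, _, rfl⟩
  rcases (pv_mem_postings ct t i).mp hi with ⟨j, hj, rfl, _⟩
  constructor
  · positivity
  · exact_mod_cast hj

lemma pv_collide_props (ct : List (String × List Int)) :
    (pvCollide ct).length = ct.length ∧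
    ∀ k : Nat, k < ct.length →
      (∀ j : Int, j ∈ (pvCollide ct).getD k ∅ ↔
        ∃ ps ∈ (pvIndex ct).values, (k : Int) ∈ ps ∧ j ∈ ps) ∧
      ((pvCollide ct).getD k ∅).Nodup := by
  have hbase : ∀ k : Nat, k < ct.length →
      (List.replicate ct.length (PySem.Set.empty : PySem.Set Int)).getD k ∅ = [] := by
    intro k hk
    rw [List.getD_eq_getElem _ _ (by simpa using hk), List.getElem_replicate]
    rfl
  have h := pv_collide_fold (pvIndex ct).values
      (List.replicate ct.length PySem.Set.empty)
      (by simpa using pv_values_range ct)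
  obtain ⟨hlen, hmem⟩ := h
  refine ⟨by simpa using hlen, ?_⟩
  intro k hk
  obtain ⟨hm, hnd⟩ := hmem k (by simpa using hk)
  unfold pvCollide
  constructor
  · intro j
    rw [hm j, hbase k hk]
    simp
  · apply hnd
    rw [hbase k hk]
    exact List.nodup_nil

lemma pv_collide_char (ct : List (String × List Int)) (k : Nat) (hk : k < ct.length) (j : Int) :
    j ∈ (pvCollide ct).getD k ∅ ↔
      ∃ m : Nat, m < ct.length ∧ j = (m : Int) ∧ ∃ t ∈ pvVal ct k, t ∈ pvVal ct m := by
  rw [((pv_collide_props ct).2 k hk).1 j]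
  constructor
  · rintro ⟨ps, hps, hkps, hjps⟩
    rw [pv_index_values] at hps
    rcases List.mem_map.mp hps with ⟨t, _, rfl⟩
    rcases (pv_mem_postings ct t _).mp hkps with ⟨k', hk', hkk', htk'⟩
    have : k' = k := by exact_mod_cast hkk'.symm
    subst this
    rcases (pv_mem_postings ct t j).mp hjps with ⟨m, hm, rfl, htm⟩
    exact ⟨m, hm, rfl, t, htk', htm⟩
  · rintro ⟨m, hm, rfl, t, htk, htm⟩
    have htkeys : t ∈ (pvIndex ct).keys := by
      rw [pv_index_keys, PySem.Set.mem_ofList]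
      exact List.mem_map.mpr ⟨(t, (k : Int)), (pv_mem_P ct t _).mpr ⟨k, hk, rfl, htk⟩, rfl⟩
    refine ⟨(pvIndex ct).getD t [], ?_, ?_, ?_⟩
    · rw [pv_index_values]
      exact List.mem_map.mpr ⟨t, htkeys, rfl⟩
    · exact (pv_mem_postings ct t _).mpr ⟨k, hk, rfl, htk⟩
    · exact (pv_mem_postings ct t _).mpr ⟨m, hm, rfl, htm⟩

lemma pv_sorted_collide (ct : List (String × List Int)) (k : Nat) (hk : k < ct.length) :
    PySem.List.sorted ((pvCollide ct).getD k ∅) id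
      = (PySem.List.pyRange 0 (ct.length : Int) 1).filter
          (fun j => decide (j ∈ (pvCollide ct).getD k ∅)) := by
  apply PySem.List.sorted_eq_of_perm_of_pairwise_lt
  · rw [List.perm_ext_iff_of_nodup
      (((PySem.List.nodup_pyRange_one _ _)).filter _) ((pv_collide_props ct).2 k hk).2]
    intro j
    rw [List.mem_filter, PySem.List.mem_pyRange_one]
    constructor
    · rintro ⟨_, hd⟩
      simpa using hd
    · intro hj
      refine ⟨?_, by simpa using hj⟩
      rcases (pv_collide_char ct k hk j).mp hj with ⟨m, hm, rfl, _⟩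
      constructor
      · positivity
      · exact_mod_cast hm
  · simpa [id] using (PySem.List.pairwise_lt_pyRange_one 0 (ct.length : Int)).filter
      (fun j => decide (j ∈ (pvCollide ct).getD k ∅))

lemma pvB_canon (ct : List (String × List Int)) (hnd : (ct.map Prod.fst).Nodup) :
    determineCollision_alt ct = pvCanon ct := by
  unfold determineCollision_alt
  simp only []
  have hidx : ((PySem.List.enumerate ct).foldl (fun ix p =>
      p.2.2.foldl (fun ix t => ix.modify t [] (fun ps => ps ++ [p.1])) ix)
      PySem.Dict.empty) = pvIndex ct := by
    unfold pvIndex pvP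
    rw [List.foldl_flatMap]
    congr 1
    funext acc x
    rw [List.foldl_map]
  rw [hidx]
  have hcol : ((pvIndex ct).values.foldl (fun c ps =>
      ps.foldl (fun c i =>
        PySem.List.pySetD c i (PySem.Set.update (PySem.List.pyGetD c i PySem.Set.empty) ps)) c)
      (List.replicate ct.length PySem.Set.empty)) = pvCollide ct := rfl
  rw [hcol]
  have h2 := PySem.Dict.items_foldl_insert_fresh (κ := String) (ν := List String)
      (PySem.List.enumerate ct) (fun p => p.2.1)
      (fun p => (((PySem.List.sorted (PySem.List.pyGetD (pvCollide ct) p.1 PySem.Set.empty) id).filter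
            (fun j => j ≠ p.1)).map (fun j => (PySem.List.pyGetD ct j ("", [])).1)))
      PySem.Dict.empty
      (by intro a _; exact PySem.Dict.contains_empty _)
      (by
        have : (PySem.List.enumerate ct).map (fun p => p.2.1)
            = ((PySem.List.enumerate ct).map (fun p => p.2)).map (fun q => q.1) := by
          rw [List.map_map]; rfl
        rw [this, PySem.List.map_snd_enumerate]
        simpa using hnd)
  rw [h2, show (PySem.Dict.empty : PySem.Dict String (List String)).items = [] from rfl,
    List.nil_append]
  unfold pvCanon
  apply List.ext_getElem (by simp [PySem.List.length_enumerate])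
  intro i h1 h2'
  have hi : i < ct.length := by simpa [PySem.List.length_enumerate] using h1
  simp only [List.getElem_map, List.getElem_range]
  rw [pv_enumerate_getElem ct 0 i hi]
  simp only [zero_add]
  have hkeyi : ct[i].1 = pvKey ct i := by simp [pvKey, pvDflt, hi]
  rw [hkeyi]
  congr 1
  -- the collision list of class i
  rw [show PySem.List.pyGetD (pvCollide ct) (i : Int) PySem.Set.empty
      = (pvCollide ct).getD i ∅ by simp [PySem.List.pyGetD_natCast]]
  rw [pv_sorted_collide ct i hi, List.filter_filter]
  rw [PySem.List.pyRange_one]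
  simp only [sub_zero, Int.toNat_natCast]
  rw [List.filter_map, List.map_map]
  have hfil : (List.range ct.length).filter
        ((fun j => decide (j ≠ (i : Int)) && decide (j ∈ (pvCollide ct).getD i ∅)) ∘ (fun k : Nat => ((0 : Int) + k)))
      = (List.range ct.length).filter (fun j => decide (j ≠ i) && pvShare ct i j) := by
    apply List.filter_congr
    intro m hm
    have hmn : m < ct.length := List.mem_range.mp hm
    simp only [Function.comp_apply, zero_add]
    congr 1
    · simp
    · have hiff : ((m : Int) ∈ (pvCollide ct).getD i ∅) ↔ (∃ t ∈ pvVal ct i, t ∈ pvVal ct m) := by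
        rw [pv_collide_char ct i hi]
        constructor
        · rintro ⟨m', hm', hmm', hsh⟩
          have : m' = m := by exact_mod_cast hmm'.symm
          subst this
          exact hsh
        · intro hsh
          exact ⟨m, hmn, rfl, hsh⟩
      rw [pvShare]
      exact decide_eq_decide.mpr hiff
  rw [hfil]
  apply List.map_congr_left
  intro m _
  simp [pvKey, pvDflt, PySem.List.pyGetD_natCast]

-- ===== VERDICT (by name: the statement is the Claim_ definition above) =====
theorem determineCollision_spec : Claim_equal_determineCollision := by
  intro ct _ hpre
  unfold Spec_determineCollision
  rw [pvA_canon ct hpre, pvB_canon ct hpre]
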